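-- pv_equiv track=rewrite | github.com/pilshub/aoe4-ragbot | backend/scripts/update_knowledge.py | get_latest_dates
-- ===== SOURCE A (Python) =====
-- def get_latest_dates(videos: list[dict]) -> dict[str, str]:
--     """Get the latest upload_date per channel from existing catalog."""
--     latest = {}
--     for v in videos:
--         ch = v["channel"]
--         date = v.get("upload_date", "")
--         if date and (ch not in latest or date > latest[ch]):
--             latest[ch] = date
--     return latest
-- ===== SOURCE B (Python) =====
-- def get_latest_dates(videos: list[dict]) -> dict[str, str]:
--     """Get the latest upload_date per channel from existing catalog."""
--     groups = {}
--     for v in videos: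
--         ch = v["channel"]
--         date = v.get("upload_date", "")
--         if date:
--             groups.setdefault(ch, []).append(date)
--     return {ch: max(dates) for ch, dates in groups.items()}
-- ===== Notes on version B (the rewrite author's own statement) =====
-- stated objective: alternative
-- what changed: Replaces the single-pass running-max dict with a group-then-reduce scheme: one pass collects each channel's non-empty dates into lists, then a dict comprehension reduces each list with max().
import Mathlib
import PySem

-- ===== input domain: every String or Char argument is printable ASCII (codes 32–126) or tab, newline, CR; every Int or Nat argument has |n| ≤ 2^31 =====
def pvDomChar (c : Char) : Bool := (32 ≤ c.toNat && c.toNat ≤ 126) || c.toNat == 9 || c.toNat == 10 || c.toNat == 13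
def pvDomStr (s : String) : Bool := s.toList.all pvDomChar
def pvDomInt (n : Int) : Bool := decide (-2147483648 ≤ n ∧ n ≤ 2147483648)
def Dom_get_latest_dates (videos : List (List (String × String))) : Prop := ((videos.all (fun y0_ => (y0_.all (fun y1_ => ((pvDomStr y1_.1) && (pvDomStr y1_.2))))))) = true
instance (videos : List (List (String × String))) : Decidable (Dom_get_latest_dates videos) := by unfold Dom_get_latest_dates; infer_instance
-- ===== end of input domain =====

-- B groups each channel's non-empty dates into lists in one pass and then reduces each list
-- with max(), instead of A's single-pass running-max dict; same cost, different decomposition.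


-- ===== PORT A =====
-- Each video dict is an association list; lookups go through PySem.Dict.ofList (Python's dict
-- construction, last key wins).  v["channel"] is ported as the total getD form: Pre_ guarantees
-- the key "channel" is present, so this is exact.  Python's 'date > latest[ch]' on str is
-- code-point lexicographic, i.e. '<' on the toList sides (exact per PYSEM.md).
def get_latest_dates (videos : List (List (String × String))) : List (String × String) :=
  (videos.foldl (fun latest v =>
      let ch := (PySem.Dict.ofList v).getD "channel" ""
      let date := (PySem.Dict.ofList v).getD "upload_date" ""
      if date ≠ "" ∧ (latest.contains ch = false ∨ (latest.getD ch "").toList < date.toList)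
      then latest.insert ch date else latest)
    PySem.Dict.empty).items

-- ===== PORT B =====
-- max(dates) for a non-empty list of str (first maximal element; comparison as in port A)
def pymaxStr : List String → String
  | [] => ""
  | x :: xs => xs.foldl (fun m y => if m.toList < y.toList then y else m) x

def get_latest_dates_alt (videos : List (List (String × String))) : List (String × String) :=
  let groups : PySem.Dict String (List String) :=
    videos.foldl (fun g v =>
      let ch := (PySem.Dict.ofList v).getD "channel" ""
      let date := (PySem.Dict.ofList v).getD "upload_date" ""
      if date ≠ "" then g.modify ch [] (· ++ [date]) else g)
    PySem.Dict.empty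
  groups.items.map (fun p => (p.1, pymaxStr p.2))

-- ===== PRECONDITION & SPEC =====
-- Pre_ excludes exactly the inputs where v["channel"] raises KeyError (both A and B raise there).
def Pre_get_latest_dates (videos : List (List (String × String))) : Prop :=
  ∀ v ∈ videos, "channel" ∈ v.map Prod.fst
instance (videos : List (List (String × String))) : Decidable (Pre_get_latest_dates videos) := by unfold Pre_get_latest_dates; infer_instance
def pvWitness_get_latest_dates : (List (List (String × String))) :=
  [[("channel", "aoe4"), ("upload_date", "20240101")], [("channel", "aoe4"), ("upload_date", "20240301")]]
def Spec_get_latest_dates (videos : List (List (String × String))) (out : List (String × String)) : Prop := out = get_latest_dates_alt videos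
instance (videos : List (List (String × String))) (out : List (String × String)) : Decidable (Spec_get_latest_dates videos out) := by unfold Spec_get_latest_dates; infer_instance

-- ===== CLAIM (what is proved, stated in full; the proofs are below) =====
def Claim_equal_get_latest_dates : Prop := ∀ (videos : List (List (String × String))), Dom_get_latest_dates videos → Pre_get_latest_dates videos → Spec_get_latest_dates videos (get_latest_dates videos)

-- ===== LEMMAS AND PROOFS =====

lemma modify_eq_insert (d : PySem.Dict String (List String)) (k : String) (f : List String → List String) :
    d.modify k [] f = d.insert k (f (d.getD k [])) := by
  simp [PySem.Dict.modify, PySem.Dict.insert]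

lemma pymaxStr_append (ds : List String) (d : String) (hd : d ≠ "") :
    pymaxStr (ds ++ [d]) = if (pymaxStr ds).toList < d.toList then d else pymaxStr ds := by
  cases ds with
  | nil =>
    have hnil : d.toList ≠ [] := fun h => hd (String.toList_eq_nil_iff.mp h)
    simp only [pymaxStr, List.nil_append]
    cases h : d.toList with
    | nil => exact absurd h hnil
    | cons c cs =>
      simp only [List.foldl_nil, String.toList_empty, if_pos (List.nil_lt_cons c cs)]
  | cons x xs =>
    simp [pymaxStr, List.foldl_append]

lemma keys_eq_of_items (latest : PySem.Dict String String) (g : PySem.Dict String (List String))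
    (hitems : latest.items = g.items.map (fun p => (p.1, pymaxStr p.2))) :
    latest.keys = g.keys := by
  simp [PySem.Dict.keys, hitems, List.map_map, Function.comp]

lemma fold_inv : ∀ (videos : List (List (String × String)))
    (latest : PySem.Dict String String) (g : PySem.Dict String (List String)),
    g.keys.Nodup →
    latest.items = g.items.map (fun p => (p.1, pymaxStr p.2)) →
    (videos.foldl (fun latest v =>
        if (PySem.Dict.ofList v).getD "upload_date" "" ≠ "" ∧
            (latest.contains ((PySem.Dict.ofList v).getD "channel" "") = false ∨
              (latest.getD ((PySem.Dict.ofList v).getD "channel" "") "").toList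
                < ((PySem.Dict.ofList v).getD "upload_date" "").toList)
        then latest.insert ((PySem.Dict.ofList v).getD "channel" "")
              ((PySem.Dict.ofList v).getD "upload_date" "")
        else latest) latest).items
      = ((videos.foldl (fun g v =>
            if (PySem.Dict.ofList v).getD "upload_date" "" ≠ ""
            then g.modify ((PySem.Dict.ofList v).getD "channel" "") []
                  (· ++ [(PySem.Dict.ofList v).getD "upload_date" ""])
            else g) g).items).map
          (fun p => (p.1, pymaxStr p.2))
  | [], latest, g, hnd, hitems => hitems
  | v :: rest, latest, g, hnd, hitems => by
    simp only [List.foldl_cons]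
    set ch := (PySem.Dict.ofList v).getD "channel" "" with hch
    set date := (PySem.Dict.ofList v).getD "upload_date" "" with hdate
    by_cases hd : date = ""
    · rw [if_neg (fun hcon => hcon.1 hd), if_neg (fun hcon => hcon hd)]
      exact fold_inv rest latest g hnd hitems
    · have hkeys := keys_eq_of_items latest g hitems
      have hcont : latest.contains ch = g.contains ch := by
        rw [PySem.Dict.contains_eq_decide_mem_keys, PySem.Dict.contains_eq_decide_mem_keys, hkeys]
      rw [modify_eq_insert, if_pos hd]
      by_cases hc : g.contains ch = true
      · -- channel already grouped
        obtain ⟨ds, hget⟩ : ∃ ds, g.get? ch = some ds := by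
          have := PySem.Dict.contains_eq_isSome_get? (d := g) (k := ch)
          rw [hc] at this
          exact Option.isSome_iff_exists.mp this.symm
        have hgd : g.getD ch [] = ds := by
          rw [PySem.Dict.getD_eq_get?_getD, hget]; rfl
        have hmem : (ch, ds) ∈ g.items := PySem.Dict.mem_items_of_get?_eq_some g hget
        have hlmem : (ch, pymaxStr ds) ∈ latest.items := by
          rw [hitems]; exact List.mem_map.mpr ⟨(ch, ds), hmem, rfl⟩
        have hlnd : latest.keys.Nodup := hkeys ▸ hnd
        have hlgd : latest.getD ch "" = pymaxStr ds := by
          exact PySem.Dict.getD_of_mem_items latest hlmem hlnd ""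
        rw [hgd]
        have hnd' : (g.insert ch (ds ++ [date])).keys.Nodup := PySem.Dict.nodup_keys_insert g ch (ds ++ [date]) hnd
        by_cases hlt : (pymaxStr ds).toList < date.toList
        · -- newer date: both sides replace the entry at ch
          rw [if_pos ⟨hd, Or.inr (by rw [hlgd]; exact hlt)⟩]
          apply fold_inv rest _ _ hnd'
          rw [PySem.Dict.items_insert_of_contains latest date (by rw [hcont]; exact hc),
              PySem.Dict.items_insert_of_contains g (ds ++ [date]) hc, hitems, List.map_map, List.map_map]
          apply List.map_congr_left
          intro p hp
          by_cases hpc : p.1 == ch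
          · simp [Function.comp, hpc, pymaxStr_append ds date hd, hlt]
          · simp [Function.comp, hpc]
        · -- not newer: A keeps its entry, B's appended list has the same max
          rw [if_neg (by
            rintro ⟨-, h | h⟩
            · rw [hcont] at h; exact absurd hc (by simp [h])
            · rw [hlgd] at h; exact hlt h)]
          apply fold_inv rest _ _ hnd'
          rw [PySem.Dict.items_insert_of_contains g (ds ++ [date]) hc, List.map_map, hitems]
          apply List.map_congr_left
          intro p hp
          by_cases hpc : p.1 == ch
          · have hp1 : p.1 = ch := by simpa using hpc
            have : g.getD ch [] = p.2 := PySem.Dict.getD_of_mem_items g (hp1 ▸ hp) hnd []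
            have hp2 : p.2 = ds := by rw [← this, hgd]
            simp [Function.comp, hp1, hp2, pymaxStr_append ds date hd, hlt]
          · simp [Function.comp, hpc]
      · -- first non-empty date for this channel: both sides append a fresh entry
        have hc' : g.contains ch = false := by simpa using hc
        have hlc : latest.contains ch = false := by rw [hcont]; exact hc'
        rw [if_pos ⟨hd, Or.inl hlc⟩, PySem.Dict.getD_of_not_contains g [] hc']
        apply fold_inv rest _ _ (PySem.Dict.nodup_keys_insert g ch ([] ++ [date]) hnd)
        rw [PySem.Dict.items_insert_of_not_contains latest date hlc,
            PySem.Dict.items_insert_of_not_contains g ([] ++ [date]) hc', List.map_append, hitems]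
        simp [pymaxStr]

-- ===== VERDICT (by name: the statement is the Claim_ definition above) =====
theorem get_latest_dates_spec : Claim_equal_get_latest_dates := by
  intro videos _ _
  unfold Spec_get_latest_dates get_latest_dates get_latest_dates_alt
  exact fold_inv videos PySem.Dict.empty PySem.Dict.empty (by simp [PySem.Dict.empty, PySem.Dict.keys]) (by simp [PySem.Dict.empty])
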